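-- pv_equiv track=rewrite | github.com/followcat/cloudshare | webapp/restful/search.py | experience_process
-- ===== SOURCE A (Python) =====
-- def experience_process(experience):
--     ex_company = experience['company'] if len(experience) and 'company' in experience else []
--     ex_position = experience['position'] if len(experience) and 'position' in experience else []
--
--     if len(ex_position) > 0:
--         for position in ex_position:
--             for company in ex_company:
--                 if position['at_company'] == company['id']:
--                     position['company'] = company['name']
--                     if 'business' in company:
--                         position['business'] = company['business']
--         return ex_position
--     else:
--         return ex_company
-- ===== SOURCE B (Python) =====
-- def experience_process(experience):
--     ex_company = experience['company'] if len(experience) and 'company' in experience else []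
--     ex_position = experience['position'] if len(experience) and 'position' in experience else []
--
--     if len(ex_position) > 0:
--         index = {}
--         for company in ex_company:
--             index.setdefault(company['id'], []).append(company)
--         for position in ex_position:
--             for company in index.get(position.get('at_company'), []):
--                 position['company'] = company['name']
--                 if 'business' in company:
--                     position['business'] = company['business']
--         return ex_position
--     else:
--         return ex_company
-- ===== Notes on version B (the rewrite author's own statement) =====
-- stated objective: alternative
-- what changed: B builds a dict index grouping companies by id once and each position looks up its matching group directly, instead of A's nested scan of all companies per position.
import Mathlib
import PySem

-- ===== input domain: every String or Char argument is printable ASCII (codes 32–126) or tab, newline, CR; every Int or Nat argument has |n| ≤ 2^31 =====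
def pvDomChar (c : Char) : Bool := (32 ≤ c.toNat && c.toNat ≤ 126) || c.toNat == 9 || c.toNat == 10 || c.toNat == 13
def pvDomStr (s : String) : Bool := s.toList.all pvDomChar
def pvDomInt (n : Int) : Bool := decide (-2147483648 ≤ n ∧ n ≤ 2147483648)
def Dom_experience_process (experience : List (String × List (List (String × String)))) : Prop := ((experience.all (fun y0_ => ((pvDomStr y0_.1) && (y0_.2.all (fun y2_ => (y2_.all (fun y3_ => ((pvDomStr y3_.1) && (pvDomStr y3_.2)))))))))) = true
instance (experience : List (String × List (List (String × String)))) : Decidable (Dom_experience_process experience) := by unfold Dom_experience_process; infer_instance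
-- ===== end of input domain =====

-- B replaces A's inner scan of all companies per position by a dict index grouping companies
-- by id, built once.  Both Pythons mutate the position dicts in place (same mutation); the
-- equivalence proved here is about the returned value.

-- shared dict primitives (Python dict lookup / 'in' / assignment on string dicts)
def pvGetS (d : List (String × String)) (k : String) : String :=
  ((PySem.Dict.mk d).get? k).getD ""
def pvHas (d : List (String × String)) (k : String) : Bool :=
  (PySem.Dict.mk d).contains k
def pvSet (d : List (String × String)) (k v : String) : List (String × String) :=
  ((PySem.Dict.mk d).insert k v).items

-- ===== PORT A =====
def experience_process (experience : List (String × List (List (String × String)))) : List (List (String × String)) :=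
  let exCompany := if experience.length != 0 && (PySem.Dict.mk experience).contains "company"
    then ((PySem.Dict.mk experience).get? "company").getD [] else []
  let exPosition := if experience.length != 0 && (PySem.Dict.mk experience).contains "position"
    then ((PySem.Dict.mk experience).get? "position").getD [] else []
  if exPosition.length > 0 then
    exPosition.map (fun position =>
      exCompany.foldl (fun position company =>
        if pvGetS position "at_company" == pvGetS company "id" then
          let position := pvSet position "company" (pvGetS company "name")
          if pvHas company "business" then
            pvSet position "business" (pvGetS company "business")
          else position
        else position) position)
  else exCompany

-- ===== PORT B =====
-- the body of B's (unconditional) inner loop over a position's matching group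
def pvApplyCompany (position company : List (String × String)) : List (String × String) :=
  let position := pvSet position "company" (pvGetS company "name")
  if pvHas company "business" then
    pvSet position "business" (pvGetS company "business")
  else position

def experience_process_alt (experience : List (String × List (List (String × String)))) : List (List (String × String)) :=
  let exCompany := if experience.length != 0 && (PySem.Dict.mk experience).contains "company"
    then ((PySem.Dict.mk experience).get? "company").getD [] else []
  let exPosition := if experience.length != 0 && (PySem.Dict.mk experience).contains "position"
    then ((PySem.Dict.mk experience).get? "position").getD [] else []
  if exPosition.length > 0 then
    let index := exCompany.foldl
      (fun d company => d.modify (pvGetS company "id") [] (· ++ [company]))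
      PySem.Dict.empty
    exPosition.map (fun position =>
      (index.getD (pvGetS position "at_company") []).foldl pvApplyCompany position)
  else exCompany

-- ===== PRECONDITION & SPEC =====
-- Pre_ excludes exactly the inputs where Python A raises KeyError: both lists non-empty and
-- some position lacks 'at_company', some company lacks 'id', or a matched company lacks 'name'.
def Pre_experience_process (experience : List (String × List (List (String × String)))) : Prop :=
  let exCompany := if experience.length != 0 && (PySem.Dict.mk experience).contains "company"
    then ((PySem.Dict.mk experience).get? "company").getD [] else []
  let exPosition := if experience.length != 0 && (PySem.Dict.mk experience).contains "position"
    then ((PySem.Dict.mk experience).get? "position").getD [] else []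
  exPosition ≠ [] → exCompany ≠ [] →
    (∀ p ∈ exPosition, pvHas p "at_company" = true) ∧
    (∀ c ∈ exCompany, pvHas c "id" = true ∧
      ((∃ p ∈ exPosition, pvGetS p "at_company" = pvGetS c "id") → pvHas c "name" = true))
instance (experience : List (String × List (List (String × String)))) : Decidable (Pre_experience_process experience) := by unfold Pre_experience_process; infer_instance

def pvWitness_experience_process : (List (String × List (List (String × String)))) :=
  [("company", [[("id", "1"), ("name", "Acme"), ("business", "IT")], [("id", "2"), ("name", "B")]]),
   ("position", [[("at_company", "1")], [("at_company", "9"), ("company", "old")]])]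

def Spec_experience_process (experience : List (String × List (List (String × String)))) (out : List (List (String × String))) : Prop := out = experience_process_alt experience
instance (experience : List (String × List (List (String × String)))) (out : List (List (String × String))) : Decidable (Spec_experience_process experience out) := by unfold Spec_experience_process; infer_instance

-- ===== CLAIM (what is proved, stated in full; the proofs are below) =====
def Claim_equal_experience_process : Prop := ∀ (experience : List (String × List (List (String × String)))), Dom_experience_process experience → Pre_experience_process experience → Spec_experience_process experience (experience_process experience)

-- ===== LEMMAS AND PROOFS =====

-- setting one key does not change lookup of a different key
theorem pvGetS_pvSet_ne (d : List (String × String)) (k k' v : String) (h : k' ≠ k) :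
    pvGetS (pvSet d k v) k' = pvGetS d k' := by
  simp [pvGetS, pvSet, PySem.Dict.get?_insert_of_ne _ _ h]

theorem pvGetS_apply (pos c : List (String × String)) :
    pvGetS (pvApplyCompany pos c) "at_company" = pvGetS pos "at_company" := by
  unfold pvApplyCompany
  split_ifs <;>
    simp [pvGetS_pvSet_ne _ _ _ _ (by decide : "at_company" ≠ "business"),
          pvGetS_pvSet_ne _ _ _ _ (by decide : "at_company" ≠ "company")]

-- A's guarded scan over all companies = B's unconditional fold over the matching ones
theorem foldA_eq_filter (at_ : String) (cs : List (List (String × String)))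
    (pos : List (String × String)) (h : pvGetS pos "at_company" = at_) :
    cs.foldl (fun position company =>
        if pvGetS position "at_company" == pvGetS company "id" then
          let position := pvSet position "company" (pvGetS company "name")
          if pvHas company "business" then
            pvSet position "business" (pvGetS company "business")
          else position
        else position) pos
    = (cs.filter (fun c => pvGetS c "id" == at_)).foldl pvApplyCompany pos := by
  induction cs generalizing pos with
  | nil => rfl
  | cons c cs ih =>
    simp only [List.foldl_cons, List.filter_cons, h]
    by_cases hc : pvGetS c "id" = at_
    · have h1 : (at_ == pvGetS c "id") = true := by simp [hc]
      have h2 : (pvGetS c "id" == at_) = true := by simp [hc]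
      rw [h1, h2]
      simp only [if_true, List.foldl_cons]
      exact ih (pvApplyCompany pos c) (by rw [pvGetS_apply, h])
    · have h1 : (at_ == pvGetS c "id") = false := by simp [Ne.symm hc]
      have h2 : (pvGetS c "id" == at_) = false := by simp [hc]
      rw [h1, h2]
      simp only [Bool.false_eq_true, if_false]
      exact ih pos h

-- the index group for a key is exactly the filtered company list, in order
theorem index_getD (cs : List (List (String × String))) (at_ : String) :
    (cs.foldl (fun d company => d.modify (pvGetS company "id") [] (· ++ [company]))
        (PySem.Dict.empty : PySem.Dict String (List (List (String × String))))).getD at_ []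
    = cs.filter (fun c => pvGetS c "id" == at_) := by
  have hmap : cs.foldl (fun d company => d.modify (pvGetS company "id") [] (· ++ [company]))
      (PySem.Dict.empty : PySem.Dict String (List (List (String × String))))
      = (cs.map (fun c => (pvGetS c "id", c))).foldl
          (fun d p => d.modify p.1 [] (· ++ [p.2])) PySem.Dict.empty := by
    rw [List.foldl_map]
  rw [hmap, PySem.Dict.getD_foldl_modify_append]
  simp [List.filter_map, Function.comp_def]

-- ===== VERDICT (by name: the statement is the Claim_ definition above) =====
theorem experience_process_spec : Claim_equal_experience_process := by
  intro experience _ _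
  show experience_process experience = experience_process_alt experience
  simp only [experience_process, experience_process_alt]
  split
  all_goals
    split
    · exact List.map_congr_left (fun pos _ => by
        rw [index_getD, foldA_eq_filter (pvGetS pos "at_company") _ pos rfl])
    · rfl
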